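-- pv_equiv track=rewrite | github.com/keithlo/advent_of_code_2022 | 6.py | solve
-- ===== SOURCE A (Python) =====
-- def solve(text) -> int:
--     start, chars = 0, set()
--     part1 = part2 = None      # part2
--     for end, char in enumerate(text):
--         while char in chars:
--             chars.remove(text[start])
--             start += 1
--         chars.add(char)
--         if len(chars) == 4:
--             part1 = end+1
--         if len(chars) == 14:   # part2
--             part2 = end+1
--     return part1, part2
-- ===== SOURCE B (Python) =====
-- def solve(text) -> int:
--     part1 = part2 = None
--     start = 0
--     last = {}
--     for end, char in enumerate(text):
--         j = last.get(char)
--         if j is not None and j >= start: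
--             start = j + 1
--         last[char] = end
--         length = end - start + 1
--         if length == 4:
--             part1 = end + 1
--         if length == 14:
--             part2 = end + 1
--     return part1, part2
-- ===== Notes on version B (the rewrite author's own statement) =====
-- stated objective: alternative
-- what changed: Replaces the shrink-the-window set with an inner while-loop by a single pass that keeps a dict of each character's last index and jumps the window start directly past the previous occurrence.
import Mathlib
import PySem

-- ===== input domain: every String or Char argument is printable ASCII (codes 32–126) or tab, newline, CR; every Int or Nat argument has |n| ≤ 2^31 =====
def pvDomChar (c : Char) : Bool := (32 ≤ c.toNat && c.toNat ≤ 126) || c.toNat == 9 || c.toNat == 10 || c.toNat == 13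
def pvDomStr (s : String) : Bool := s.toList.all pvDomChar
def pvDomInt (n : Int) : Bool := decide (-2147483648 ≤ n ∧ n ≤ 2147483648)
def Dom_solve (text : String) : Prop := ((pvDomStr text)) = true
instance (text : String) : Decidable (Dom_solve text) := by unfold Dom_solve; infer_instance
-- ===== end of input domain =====

-- B replaces A's set-window with an inner while-loop by a single pass keeping each
-- character's most recent index in a dict (alternative algorithm, identical outputs).

-- ===== PORT A =====
-- inner loop of A: `while char in chars: chars.remove(text[start]); start += 1`
def solveWhile (l : List Char) (char : Char) (chars : PySem.Set Char) (start : Nat) :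
    PySem.Set Char × Nat :=
  if PySem.Set.contains chars char then
    match l[start]? with
    | none => (chars, start)   -- Python raises IndexError here; unreachable from solve's initial state
    | some c =>
      match h : PySem.Set.remove? chars c with
      | none => (chars, start) -- Python raises KeyError here; unreachable from solve's initial state
      | some chars' => solveWhile l char chars' (start + 1)
  else (chars, start)
termination_by chars.length
decreasing_by
  unfold PySem.Set.remove? at h
  split at h
  · rename_i hc
    cases h
    simp only [PySem.Set.discard]
    refine List.length_filter_lt_length_iff_exists.mpr ?_
    exact ⟨c, by simpa [List.contains_eq_mem] using hc, by simp⟩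
  · cases h

-- the `for end, char in enumerate(text)` loop of A
def solveLoop (l : List Char) (rest : List Char) (i : Nat) (start : Nat)
    (chars : PySem.Set Char) (p1 p2 : Option Int) : Option Int × Option Int :=
  match rest with
  | [] => (p1, p2)
  | char :: rest' =>
    let st := solveWhile l char chars start
    let chars2 := PySem.Set.add st.1 char
    let p1' := if PySem.Set.len chars2 = 4 then some ((i : Int) + 1) else p1
    let p2' := if PySem.Set.len chars2 = 14 then some ((i : Int) + 1) else p2
    solveLoop l rest' (i + 1) st.2 chars2 p1' p2'

def solve (text : String) : Option Int × Option Int :=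
  solveLoop text.toList text.toList 0 0 PySem.Set.empty none none

-- ===== PORT B =====
-- the single `for end, char in enumerate(text)` loop of B (dict of last indices)
def altLoop (rest : List Char) (i : Nat) (start : Nat) (last : PySem.Dict Char Nat)
    (p1 p2 : Option Int) : Option Int × Option Int :=
  match rest with
  | [] => (p1, p2)
  | char :: rest' =>
    let start1 : Nat := match last.get? char with
      | some j => if start ≤ j then j + 1 else start
      | none => start
    let last1 := last.insert char i
    let len : Int := (i : Int) - (start1 : Int) + 1
    let p1' := if len = 4 then some ((i : Int) + 1) else p1
    let p2' := if len = 14 then some ((i : Int) + 1) else p2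
    altLoop rest' (i + 1) start1 last1 p1' p2'

def solve_alt (text : String) : Option Int × Option Int :=
  altLoop text.toList 0 0 PySem.Dict.empty none none

-- ===== PRECONDITION & SPEC =====
def Spec_solve (text : String) (out : Option Int × Option Int) : Prop := out = solve_alt text
instance (text : String) (out : Option Int × Option Int) : Decidable (Spec_solve text out) := by unfold Spec_solve; infer_instance

-- ===== CLAIM (what is proved, stated in full; the proofs are below) =====
def Claim_equal_solve : Prop := ∀ (text : String), Dom_solve text → Spec_solve text (solve text)

-- ===== LEMMAS AND PROOFS =====

-- last index of c in xs (the value B's dict stores for c after scanning xs)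
def lastIdx (xs : List Char) (c : Char) : Option Nat :=
  xs.zipIdx.foldl (fun acc p => if p.1 = c then some p.2 else acc) none

theorem lastIdx_nil (c : Char) : lastIdx [] c = none := rfl

theorem lastIdx_snoc (xs : List Char) (a c : Char) :
    lastIdx (xs ++ [a]) c = if a = c then some xs.length else lastIdx xs c := by
  unfold lastIdx
  rw [List.zipIdx_append, List.foldl_append]
  simp

theorem lastIdx_some_spec (xs : List Char) (c : Char) (j : Nat)
    (h : lastIdx xs c = some j) : j < xs.length ∧ xs[j]? = some c := by
  induction xs using List.reverseRecOn with
  | nil => simp [lastIdx_nil] at h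
  | append_singleton xs a ih =>
    rw [lastIdx_snoc] at h
    by_cases hac : a = c
    · simp [hac] at h
      subst h
      constructor
      · simp
      · rw [hac] at *
        simp
    · simp [hac] at h
      obtain ⟨h1, h2⟩ := ih h
      refine ⟨by simp; omega, ?_⟩
      rw [List.getElem?_append_left h1]
      exact h2

theorem lastIdx_max (xs : List Char) (c : Char) (k : Nat)
    (hk : k < xs.length) (hget : xs[k]? = some c) :
    ∃ j, lastIdx xs c = some j ∧ k ≤ j := by
  induction xs using List.reverseRecOn with
  | nil => simp at hk
  | append_singleton xs a ih =>
    rw [lastIdx_snoc]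
    by_cases hac : a = c
    · exact ⟨xs.length, by simp [hac], by simp at hk; omega⟩
    · simp [hac]
      rcases Nat.lt_or_ge k xs.length with hlt | hge
      · rw [List.getElem?_append_left hlt] at hget
        exact ih hlt hget
      · exfalso
        have : k = xs.length := by simp at hk; omega
        subst this
        rw [List.getElem?_concat_length] at hget
        exact hac (by injection hget)


theorem solveWhile_not_mem (l : List Char) (char : Char) (chars : PySem.Set Char)
    (start : Nat) (h : char ∉ chars) : solveWhile l char chars start = (chars, start) := by
  rw [solveWhile]
  simp [PySem.Set.contains, List.contains_eq_mem, h]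

theorem solveWhile_spec (l : List Char) (char : Char) (i : Nat) (hi : i ≤ l.length)
    (j : Nat) (hj : j < i) (hget : (l.take i)[j]? = some char) :
    ∀ (n start : Nat), j - start = n → start ≤ j →
      ((l.take i).drop start).Nodup →
      (∀ k, start ≤ k → k < i → (l.take i)[k]? = some char → k = j) →
      solveWhile l char ((l.take i).drop start) start
        = ((l.take i).drop (j + 1), j + 1) := by
  have hTlen : (l.take i).length = i := by simp [Nat.min_eq_left hi]
  intro n
  induction n with
  | zero =>
    intro start hn hsj hnd huniq
    have hsj' : start = j := by omega
    have hslt : start < i := by omega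
    have hcons : (l.take i).drop start
        = (l.take i)[start]'(by omega) :: (l.take i).drop (start + 1) :=
      List.drop_eq_getElem_cons (by omega)
    have hhead : (l.take i)[start]'(by omega) = char := by
      have h2 := hget
      rw [← hsj', List.getElem?_eq_getElem (by omega)] at h2
      injection h2
    have hmem : char ∈ (l.take i).drop start := by
      rw [hcons, hhead]; exact List.mem_cons_self
    have hnotmem : char ∉ (l.take i).drop (start + 1) := by
      intro hm
      obtain ⟨m, hm1, hm2⟩ := List.getElem_of_mem hm
      have hk : (l.take i)[start + 1 + m]? = some char := by
        rw [← List.getElem?_drop]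
        exact hm2 ▸ List.getElem?_eq_getElem hm1
      have hmlt : start + 1 + m < i := by
        have := hm1; simp [hTlen] at this; omega
      have := huniq _ (by omega) hmlt hk
      omega
    rw [solveWhile]
    have hcont : PySem.Set.contains ((l.take i).drop start) char = true := by
      simp [PySem.Set.contains, List.contains_eq_mem, hmem]
    simp only [hcont, if_true]
    have hls : l[start]? = some char := by
      rw [← List.getElem?_take_of_lt hslt]
      rw [← hsj'] at hget
      exact hget
    have hrem : PySem.Set.remove? ((l.take i).drop start) char
        = some ((l.take i).drop (start + 1)) := by
      simp only [PySem.Set.remove?, PySem.Set.discard]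
      rw [if_pos (by simpa [List.contains_eq_mem] using hmem)]
      congr 1
      rw [hcons, hhead, List.filter_cons_of_neg (by simp)]
      refine List.filter_eq_self.mpr (fun x hx => ?_)
      simp only [Bool.not_eq_true', beq_eq_false_iff_ne]
      exact fun hxa => hnotmem (hxa ▸ hx)
    rw [hls]
    split
    · rename_i heq; cases heq
    · rename_i c heq
      injection heq with heq; subst heq
      split
      · rename_i heq2; rw [hrem] at heq2; cases heq2
      · rename_i chars2 heq2
        rw [hrem] at heq2
        injection heq2 with heq2; subst heq2
        rw [solveWhile_not_mem l char _ _ hnotmem, hsj']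
  | succ n ihn =>
    intro start hn hsj hnd huniq
    have hslt : start < j := by omega
    have hcons : (l.take i).drop start
        = (l.take i)[start]'(by omega) :: (l.take i).drop (start + 1) :=
      List.drop_eq_getElem_cons (by omega)
    have hheadne : (l.take i)[start]'(by omega) ≠ char := by
      intro hh
      have h2 : (l.take i)[start]? = some char := by
        rw [List.getElem?_eq_getElem (by omega)]; exact congrArg some hh
      have := huniq start le_rfl (by omega) h2
      omega
    have hmem : char ∈ (l.take i).drop start := by
      have h2 : ((l.take i).drop start)[j - start]? = some char := by
        rw [List.getElem?_drop, show start + (j - start) = j by omega]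
        exact hget
      exact List.mem_of_getElem? h2
    rw [solveWhile]
    have hcont : PySem.Set.contains ((l.take i).drop start) char = true := by
      simp [PySem.Set.contains, List.contains_eq_mem, hmem]
    simp only [hcont, if_true]
    have hls : l[start]? = some ((l.take i)[start]'(by omega)) := by
      rw [← List.getElem?_take_of_lt (show start < i by omega)]
      exact List.getElem?_eq_getElem (by omega)
    have hnotmem : (l.take i)[start]'(by omega) ∉ (l.take i).drop (start + 1) := by
      have h2 := hnd
      rw [hcons] at h2
      exact (List.nodup_cons.mp h2).1
    have hrem : PySem.Set.remove? ((l.take i).drop start) ((l.take i)[start]'(by omega))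
        = some ((l.take i).drop (start + 1)) := by
      simp only [PySem.Set.remove?, PySem.Set.discard]
      rw [if_pos (by rw [hcons]; simp)]
      congr 1
      rw [hcons, List.filter_cons_of_neg (by simp)]
      refine List.filter_eq_self.mpr (fun x hx => ?_)
      simp only [Bool.not_eq_true', beq_eq_false_iff_ne]
      exact fun hxa => hnotmem (hxa ▸ hx)
    rw [hls]
    split
    · rename_i heq; cases heq
    · rename_i c heq
      injection heq with heq; subst heq
      split
      · rename_i heq2; rw [hrem] at heq2; cases heq2
      · rename_i chars2 heq2
        rw [hrem] at heq2
        injection heq2 with heq2; subst heq2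
        exact ihn (start + 1) (by omega) (by omega)
          (by rw [hcons] at hnd; exact (List.nodup_cons.mp hnd).2)
          (fun k hk1 hk2 hk3 => huniq k (by omega) hk2 hk3)

theorem loop_eq (l : List Char) :
    ∀ (rest : List Char) (i start : Nat) (chars : PySem.Set Char)
      (last : PySem.Dict Char Nat) (p1 p2 : Option Int),
      rest = l.drop i → i ≤ l.length → start ≤ i →
      chars = (l.take i).drop start → ((l.take i).drop start).Nodup →
      (∀ c, last.get? c = lastIdx (l.take i) c) →
      solveLoop l rest i start chars p1 p2 = altLoop rest i start last p1 p2 := by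
  intro rest
  induction rest with
  | nil =>
    intro i start chars last p1 p2 _ _ _ _ _ _
    rfl
  | cons char rest' ih =>
    intro i start chars last p1 p2 hrest hi hstart hchars hnd hlast
    subst hchars
    have hTlen : (l.take i).length = i := by simp [Nat.min_eq_left hi]
    have hil : i < l.length := by
      by_contra h
      have hnil : l.drop i = [] := List.drop_eq_nil_of_le (by omega)
      rw [hnil] at hrest
      cases hrest
    have hdropcons : l.drop i = l[i] :: l.drop (i + 1) := List.drop_eq_getElem_cons hil
    rw [hdropcons] at hrest
    injection hrest with hchar hrest'
    have htake1 : l.take (i + 1) = l.take i ++ [l[i]] := List.take_succ_eq_append_getElem hil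
    have hT1len : (l.take (i + 1)).length = i + 1 := by simp [Nat.min_eq_left hil]
    by_cases hmemW : char ∈ (l.take i).drop start
    · -- char is in the current window, at the unique position j = lastIdx
      obtain ⟨m, hm1, hm2⟩ := List.getElem_of_mem hmemW
      have hk : (l.take i)[start + m]? = some char := by
        rw [← List.getElem?_drop]
        exact hm2 ▸ List.getElem?_eq_getElem hm1
      have hklt : start + m < i := by
        have := hm1; simp [hTlen] at this; omega
      obtain ⟨j, hj1, hj2⟩ := lastIdx_max (l.take i) char (start + m) (by rw [hTlen]; omega) hk
      obtain ⟨hjlt, hjget⟩ := lastIdx_some_spec (l.take i) char j hj1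
      have hjlt' : j < i := by rwa [hTlen] at hjlt
      have hstartj : start ≤ j := by omega
      have huniq : ∀ k', start ≤ k' → k' < i → (l.take i)[k']? = some char → k' = j := by
        intro k' h1 h2 h3
        have ha : ((l.take i).drop start)[k' - start]? = some char := by
          rw [List.getElem?_drop, show start + (k' - start) = k' by omega]
          exact h3
        have hb : ((l.take i).drop start)[j - start]? = some char := by
          rw [List.getElem?_drop, show start + (j - start) = j by omega]
          exact hjget
        have := List.getElem?_inj
          (show k' - start < ((l.take i).drop start).length by
            rw [List.length_drop, hTlen]; omega)
          hnd (ha.trans hb.symm)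
        omega
      have hsw := solveWhile_spec l char i hi j hjlt' hjget (j - start) start rfl hstartj hnd huniq
      have hnotmem2 : char ∉ (l.take i).drop (j + 1) := by
        intro hm
        obtain ⟨m', hm1', hm2'⟩ := List.getElem_of_mem hm
        have hk' : (l.take i)[j + 1 + m']? = some char := by
          rw [← List.getElem?_drop]
          exact hm2' ▸ List.getElem?_eq_getElem hm1'
        have hmlt' : j + 1 + m' < i := by
          have := hm1'; rw [List.length_drop, hTlen] at this; omega
        have := huniq _ (by omega) hmlt' hk'
        omega
      have hadd : PySem.Set.add ((l.take i).drop (j + 1)) char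
          = (l.take i).drop (j + 1) ++ [char] := by
        simp [PySem.Set.add, List.contains_eq_mem, hnotmem2]
      have hlen4 : PySem.Set.len ((l.take i).drop (j + 1) ++ [char])
          = (i : Int) - ((j + 1 : Nat) : Int) + 1 := by
        simp [PySem.Set.len, hTlen]
        omega
      simp only [solveLoop, altLoop, hsw, hlast char, hj1, if_pos hstartj, hadd, hlen4]
      apply ih (i + 1) (j + 1) _ _ _ _ hrest' (by omega) (by omega)
      · rw [htake1, List.drop_append_of_le_length (by rw [hTlen]; omega), ← hchar]
      · rw [htake1, List.drop_append_of_le_length (by rw [hTlen]; omega)]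
        rw [List.nodup_append]
        refine ⟨hnd.sublist (by
          have : (l.take i).drop (j + 1) = ((l.take i).drop start).drop (j + 1 - start) := by
            rw [List.drop_drop, show start + (j + 1 - start) = j + 1 by omega]
          rw [this]
          exact List.drop_sublist _ _), by simp, ?_⟩
        intro x hx y hy hxy
        simp only [List.mem_singleton] at hy
        subst hy
        rw [← hchar] at hxy
        exact hnotmem2 (hxy ▸ hx)
      · intro c
        rw [htake1, ← hchar, lastIdx_snoc, PySem.Dict.get?_insert]
        by_cases hc : c = char
        · subst hc; simp [hTlen]
        · simp [hc, Ne.symm hc, hlast c]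
    · -- char is not in the current window: start is unchanged
      have hA : solveWhile l char ((l.take i).drop start) start
          = ((l.take i).drop start, start) := solveWhile_not_mem l char _ _ hmemW
      have hB : (match last.get? char with
          | some j => if start ≤ j then j + 1 else start
          | none => start) = start := by
        rw [hlast char]
        cases hLc : lastIdx (l.take i) char with
        | none => rfl
        | some j =>
          obtain ⟨hjlt, hjget⟩ := lastIdx_some_spec (l.take i) char j hLc
          have : ¬ start ≤ j := by
            intro hsj
            apply hmemW
            apply List.mem_of_getElem? (i := j - start)
            rw [List.getElem?_drop, show start + (j - start) = j by omega]
            exact hjget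
          simp [this]
      have hadd : PySem.Set.add ((l.take i).drop start) char
          = (l.take i).drop start ++ [char] := by
        simp [PySem.Set.add, List.contains_eq_mem, hmemW]
      have hlen4 : PySem.Set.len ((l.take i).drop start ++ [char])
          = (i : Int) - (start : Int) + 1 := by
        simp [PySem.Set.len, hTlen]
        omega
      simp only [solveLoop, altLoop, hA, hB, hadd, hlen4]
      apply ih (i + 1) start _ _ _ _ hrest' (by omega) (by omega)
      · rw [htake1, List.drop_append_of_le_length (by rw [hTlen]; omega), ← hchar]
      · rw [htake1, List.drop_append_of_le_length (by rw [hTlen]; omega)]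
        rw [List.nodup_append]
        refine ⟨hnd, by simp, ?_⟩
        intro x hx y hy hxy
        simp only [List.mem_singleton] at hy
        subst hy
        rw [← hchar] at hxy
        exact hmemW (hxy ▸ hx)
      · intro c
        rw [htake1, ← hchar, lastIdx_snoc, PySem.Dict.get?_insert]
        by_cases hc : c = char
        · subst hc; simp [hTlen]
        · simp [hc, Ne.symm hc, hlast c]


-- ===== VERDICT (by name: the statement is the Claim_ definition above) =====
theorem solve_spec : Claim_equal_solve := by
  intro text _
  unfold Spec_solve solve solve_alt
  exact loop_eq text.toList text.toList 0 0 _ _ none none (by simp) (by simp) (by simp)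
    rfl (by simp) (fun c => by rw [PySem.Dict.get?_empty]; rfl)
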